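-- pv_equiv track=rewrite | github.com/zhusleep/entity_link_bilstm_crf | train_ner.py | cal_entity
-- ===== SOURCE A (Python) =====
-- def cal_entity(seq):
--     e = []
--     for i in range(len(seq)):
--         if seq[i] != 0 and i==0:
--             e.append(seq[i])
--         elif seq[i] != 0 and seq[i-1]!=seq[i]:
--             e.append(seq[i])
--     return e
-- ===== SOURCE B (Python) =====
-- def cal_entity(seq):
--     if not seq:
--         return []
--     if len(seq) == 1:
--         return [seq[0]] if seq[0] != 0 else []
--     m = len(seq) // 2
--     l, r = seq[:m], seq[m:]
--     out_r = cal_entity(r)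
--     if r[0] == l[-1] and r[0] != 0:
--         out_r = out_r[1:]
--     return cal_entity(l) + out_r
-- ===== Notes on version B (the rewrite author's own statement) =====
-- stated objective: alternative
-- what changed: Replaces A's single index loop comparing each element with its predecessor by a divide-and-conquer recursion: split the list at the midpoint, solve both halves, and merge by dropping the right half's first emitted key when its first run continues the left half's last run.
import Mathlib
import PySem

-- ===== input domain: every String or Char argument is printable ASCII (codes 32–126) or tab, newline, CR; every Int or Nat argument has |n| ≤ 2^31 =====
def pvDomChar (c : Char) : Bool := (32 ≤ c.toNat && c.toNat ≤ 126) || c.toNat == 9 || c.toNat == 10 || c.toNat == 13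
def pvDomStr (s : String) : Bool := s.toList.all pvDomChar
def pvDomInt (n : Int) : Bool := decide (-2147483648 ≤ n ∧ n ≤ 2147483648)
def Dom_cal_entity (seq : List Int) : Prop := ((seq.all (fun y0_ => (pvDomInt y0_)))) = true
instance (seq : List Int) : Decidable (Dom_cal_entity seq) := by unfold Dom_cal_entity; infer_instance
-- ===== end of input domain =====

-- B replaces A's single index loop (compare with the previous element) by a divide-and-conquer
-- recursion: split at the midpoint, solve both halves, merge with a boundary fix-up (alternative).

-- ===== PORT A =====
def cal_entity (seq : List Int) : List Int :=
  (PySem.List.pyRange 0 (PySem.List.len seq) 1).foldl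
    (fun e i =>
      if PySem.List.pyGetD seq i 0 ≠ 0 ∧ i = 0 then
        e ++ [PySem.List.pyGetD seq i 0]
      else if PySem.List.pyGetD seq i 0 ≠ 0 ∧ PySem.List.pyGetD seq (i - 1) 0 ≠ PySem.List.pyGetD seq i 0 then
        e ++ [PySem.List.pyGetD seq i 0]
      else e)
    []

-- ===== PORT B =====
-- r[0] and l[-1] are read with headD/getLastD: both halves are nonempty here, so these are exact.
def cal_entity_alt : List Int → List Int
  | [] => []
  | [x] => if x ≠ 0 then [x] else []
  | a :: b :: t =>
    cal_entity_alt ((a :: b :: t).take ((a :: b :: t).length / 2)) ++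
      (if ((a :: b :: t).drop ((a :: b :: t).length / 2)).headD 0
            = ((a :: b :: t).take ((a :: b :: t).length / 2)).getLastD 0
          ∧ ((a :: b :: t).drop ((a :: b :: t).length / 2)).headD 0 ≠ 0
       then (cal_entity_alt ((a :: b :: t).drop ((a :: b :: t).length / 2))).drop 1
       else cal_entity_alt ((a :: b :: t).drop ((a :: b :: t).length / 2)))
termination_by s => s.length
decreasing_by
  all_goals simp; omega

-- ===== PRECONDITION & SPEC =====
def Spec_cal_entity (seq : List Int) (out : List Int) : Prop := out = cal_entity_alt seq
instance (seq : List Int) (out : List Int) : Decidable (Spec_cal_entity seq out) := by unfold Spec_cal_entity; infer_instance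

-- ===== CLAIM (what is proved, stated in full; the proofs are below) =====
def Claim_equal_cal_entity : Prop := ∀ (seq : List Int), Dom_cal_entity seq → Spec_cal_entity seq (cal_entity seq)

-- ===== LEMMAS AND PROOFS =====

-- A's loop from index 1 on, as a recursion carrying the previous element.
def pvG (p : Int) : List Int → List Int
  | [] => []
  | x :: t => (if x ≠ 0 ∧ p ≠ x then [x] else []) ++ pvG x t

-- the canonical value: first element of each maximal run, zeros filtered
def pvC : List Int → List Int
  | [] => []
  | a :: t => (if a ≠ 0 then [a] else []) ++ pvG a t

lemma pvFoldA (seq : List Int) :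
    ∀ (m k : Nat), seq.length - k ≤ m → 1 ≤ k → ∀ (e : List Int),
    (PySem.List.pyRange (k : Int) (PySem.List.len seq) 1).foldl
      (fun e i =>
        if PySem.List.pyGetD seq i 0 ≠ 0 ∧ i = 0 then
          e ++ [PySem.List.pyGetD seq i 0]
        else if PySem.List.pyGetD seq i 0 ≠ 0 ∧ PySem.List.pyGetD seq (i - 1) 0 ≠ PySem.List.pyGetD seq i 0 then
          e ++ [PySem.List.pyGetD seq i 0]
        else e)
      e
    = e ++ pvG (PySem.List.pyGetD seq ((k : Int) - 1) 0) (seq.drop k) := by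
  intro m
  induction m with
  | zero =>
    intro k hm hk e
    have hlen : seq.length ≤ k := by omega
    rw [PySem.List.pyRange_one_eq_nil (by simp; omega), List.drop_eq_nil_of_le hlen]
    simp [pvG]
  | succ m ih =>
    intro k hm hk e
    by_cases hlt : k < seq.length
    · rw [PySem.List.pyRange_one_cons (by simp; omega)]
      rw [List.foldl_cons]
      have hx : PySem.List.pyGetD seq (k : Int) 0 = seq[k] := by
        rw [PySem.List.pyGetD_natCast]; exact List.getD_eq_getElem _ _ hlt
      have hdrop : seq.drop k = seq[k] :: seq.drop (k + 1) :=
        List.drop_eq_getElem_cons hlt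
      have hk0 : ((k : Int)) ≠ 0 := by omega
      have hstep : ((k : Int)) + 1 = ((k + 1 : Nat) : Int) := by push_cast; ring
      have hprev : ((k + 1 : Nat) : Int) - 1 = (k : Int) := by push_cast; ring
      rw [hstep, ih (k + 1) (by omega) (by omega)]
      rw [hdrop, hprev]
      simp only [pvG, hx, hk0, and_false, if_false]
      by_cases hc : seq[k] ≠ 0 ∧ PySem.List.pyGetD seq ((k : Int) - 1) 0 ≠ seq[k]
      · simp [hc, List.append_assoc]
      · simp [hc]
    · have hlen : seq.length ≤ k := by omega
      rw [PySem.List.pyRange_one_eq_nil (by simp; omega), List.drop_eq_nil_of_le hlen]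
      simp [pvG]

lemma calA_eq_pvC (seq : List Int) : cal_entity seq = pvC seq := by
  unfold cal_entity
  match seq with
  | [] =>
    rw [show PySem.List.len ([] : List Int) = 0 from by simp,
        PySem.List.pyRange_one_eq_nil le_rfl]
    simp [pvC]
  | a :: t =>
    rw [PySem.List.pyRange_one_cons (by simp)]
    rw [List.foldl_cons]
    have h1 : ((0 : Int)) + 1 = ((1 : Nat) : Int) := by norm_num
    rw [h1, pvFoldA (a :: t) (a :: t).length 1 (by omega) (by omega)]
    have hp : PySem.List.pyGetD (a :: t) (((1 : Nat) : Int) - 1) 0 = a := by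
      norm_num [PySem.List.pyGetD_zero_cons]
    rw [hp]
    simp only [List.drop_one, List.tail_cons]
    have h0 : PySem.List.pyGetD (a :: t) 0 0 = a := PySem.List.pyGetD_zero_cons _ _ _
    by_cases ha : a = 0
    · simp [pvC, ha]
    · simp [pvC, h0, ha]

lemma pvG_append (u : List Int) : ∀ (p : Int) (r : List Int),
    pvG p (u ++ r) = pvG p u ++ pvG (u.getLastD p) r := by
  induction u with
  | nil => intro p r; simp [pvG]
  | cons a t ih =>
    intro p r
    simp only [List.cons_append, pvG, List.getLastD_cons, ih a r, List.append_assoc]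

lemma pvG_vs_pvC (q b : Int) (r' : List Int) :
    pvG q (b :: r') =
      if b = q ∧ b ≠ 0 then (pvC (b :: r')).drop 1 else pvC (b :: r') := by
  simp only [pvG, pvC]
  by_cases hb : b = 0
  · simp [hb]
  · by_cases hq : b = q
    · subst hq; simp [hb]
    · have : q ≠ b := fun h => hq h.symm
      simp [hb, hq, this]

lemma pvC_merge (a : Int) (t r : List Int) (hr : r ≠ []) :
    pvC ((a :: t) ++ r) =
      pvC (a :: t) ++
        (if r.headD 0 = (a :: t).getLastD 0 ∧ r.headD 0 ≠ 0 then (pvC r).drop 1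
         else pvC r) := by
  match r with
  | b :: r' =>
    have hlast : t.getLastD a = (a :: t).getLastD 0 := (List.getLastD_cons ..).symm
    conv_lhs => rw [show (a :: t) ++ (b :: r') = a :: (t ++ b :: r') from rfl, pvC, pvG_append]
    conv_rhs => rw [pvC]
    rw [List.append_assoc]
    congr 1
    congr 1
    rw [pvG_vs_pvC]
    have hh : (b :: r').headD 0 = b := rfl
    rw [hh, hlast]

lemma altB_eq_pvC_aux : ∀ (n : Nat) (s : List Int), s.length ≤ n → cal_entity_alt s = pvC s := by
  intro n
  induction n with
  | zero =>
    intro s hs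
    have : s = [] := List.eq_nil_of_length_eq_zero (by omega)
    subst this; simp [cal_entity_alt, pvC]
  | succ n ih =>
    intro s hs
    match s with
    | [] => simp [cal_entity_alt, pvC]
    | [x] => simp [cal_entity_alt, pvC, pvG]
    | a :: b :: t =>
      rw [cal_entity_alt]
      have hs2 : (a :: b :: t).length = t.length + 2 := by simp
      rw [ih _ (by simp; omega), ih _ (by simp; omega)]
      have hne : (a :: b :: t).drop ((a :: b :: t).length / 2) ≠ [] := by
        simp; omega
      obtain ⟨c, u, hcu⟩ : ∃ c u,
          (a :: b :: t).take ((a :: b :: t).length / 2) = c :: u := by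
        match h : (a :: b :: t).take ((a :: b :: t).length / 2) with
        | [] =>
          exfalso
          have := congrArg List.length h
          simp at this
        | c :: u => exact ⟨c, u, rfl⟩
      conv_rhs => rw [← List.take_append_drop ((a :: b :: t).length / 2) (a :: b :: t), hcu]
      rw [pvC_merge _ _ _ hne, ← hcu]

-- ===== VERDICT (by name: the statement is the Claim_ definition above) =====
theorem cal_entity_spec : Claim_equal_cal_entity := by
  intro seq _
  show cal_entity seq = cal_entity_alt seq
  rw [calA_eq_pvC, altB_eq_pvC_aux seq.length seq le_rfl]
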